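-- pv_equiv track=rewrite | github.com/Egemenozkurt/Binning-Methods | BiningMethods.py | bin_boundaries
-- ===== SOURCE A (Python) =====
-- def bin_boundaries(data, bin_indices):
--     #Create a dictionary to store the bin data
--     bins = {}
--
--     #Populate the bins with data points
--     for i, value in enumerate(data):
--         bin_index = bin_indices[i]
--         if bin_index not in bins:
--             bins[bin_index] = []
--         bins[bin_index].append(value)
--
--     #Calculate the bin boundaries
--     bin_boundaries = {}
--     for bin_index, bin_data in bins.items():
--         min_value = min(bin_data)
--         max_value = max(bin_data)
--         bin_boundaries[bin_index] = (min_value, max_value)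
--     return bin_boundaries
-- ===== SOURCE B (Python) =====
-- def bin_boundaries(data, bin_indices):
--     boundaries = {}
--     for value, bin_index in zip(data, bin_indices):
--         if bin_index in boundaries:
--             lo, hi = boundaries[bin_index]
--             boundaries[bin_index] = (min(lo, value), max(hi, value))
--         else:
--             boundaries[bin_index] = (value, value)
--     return boundaries
-- ===== Notes on version B (the rewrite author's own statement) =====
-- stated objective: simpler
-- what changed: A makes two passes (group all values into per-bin lists, then scan each list for min/max); B makes a single pass over zip(data, bin_indices) keeping only a running (min, max) pair per bin, so the per-bin value lists and the second loop disappear.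
import Mathlib
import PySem

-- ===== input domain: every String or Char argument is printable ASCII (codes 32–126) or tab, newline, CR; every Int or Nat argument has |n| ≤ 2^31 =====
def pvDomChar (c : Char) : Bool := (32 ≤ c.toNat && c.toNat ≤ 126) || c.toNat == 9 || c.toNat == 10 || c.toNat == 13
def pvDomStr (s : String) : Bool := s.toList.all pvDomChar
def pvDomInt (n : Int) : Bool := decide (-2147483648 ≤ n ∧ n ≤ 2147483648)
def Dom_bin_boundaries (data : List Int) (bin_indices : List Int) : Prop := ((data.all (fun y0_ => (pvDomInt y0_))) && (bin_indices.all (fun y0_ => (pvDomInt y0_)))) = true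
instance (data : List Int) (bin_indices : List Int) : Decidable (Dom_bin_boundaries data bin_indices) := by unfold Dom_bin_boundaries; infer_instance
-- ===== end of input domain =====

-- B replaces A's two passes (group every value into a per-bin list, then scan the lists for min/max)
-- by ONE pass keeping only a running (min, max) pair per bin; objective: simpler (and O(n) extra space
-- in bins instead of storing all values).

-- ===== PORT A =====
-- Literal port of A: first loop groups values into per-bin lists (dict preserves first-appearance
-- order), second loop maps each list to (min, max).  min/max of a nonempty list is PySem.List.min?/max?;
-- the .getD 0 default is never reached (each bin list is nonempty).  bin_indices[i] is pyGet?
-- (none = IndexError, excluded by Pre_; .getD 0 is then never reached inside Pre_).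
def bin_boundaries (data : List Int) (bin_indices : List Int) : List (Int × Int × Int) :=
  let bins : PySem.Dict Int (List Int) :=
    (PySem.List.enumerate data).foldl
      (fun bins iv =>
        let bin_index := (PySem.List.pyGet? bin_indices iv.1).getD 0
        (if bins.contains bin_index then bins
         else bins.insert bin_index ([] : List Int)).modify bin_index [] (fun l => l ++ [iv.2]))
      PySem.Dict.empty
  (bins.items.foldl
      (fun bb p =>
        let min_value := (PySem.List.min? p.2 (fun x => x)).getD 0
        let max_value := (PySem.List.max? p.2 (fun x => x)).getD 0
        bb.insert p.1 (min_value, max_value))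
      (PySem.Dict.empty : PySem.Dict Int (Int × Int))).items

-- ===== PORT B =====
-- Literal port of B: one fold over zip(data, bin_indices), dict maps bin -> running (min, max).
def bin_boundaries_alt (data : List Int) (bin_indices : List Int) : List (Int × Int × Int) :=
  ((data.zip bin_indices).foldl
      (fun bd vb =>
        match bd.get? vb.2 with
        | some lh => bd.insert vb.2 (min lh.1 vb.1, max lh.2 vb.1)
        | none => bd.insert vb.2 (vb.1, vb.1))
      (PySem.Dict.empty : PySem.Dict Int (Int × Int))).items

-- ===== PRECONDITION & SPEC =====
-- A raises IndexError at bin_indices[i] when bin_indices is shorter than data; exactly those inputs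
-- are excluded (B's zip would silently truncate there).
def Pre_bin_boundaries (data : List Int) (bin_indices : List Int) : Prop :=
  data.length ≤ bin_indices.length
instance (data : List Int) (bin_indices : List Int) : Decidable (Pre_bin_boundaries data bin_indices) := by unfold Pre_bin_boundaries; infer_instance
def pvWitness_bin_boundaries : List Int × List Int := ([3, 1, 5, 2], [0, 1, 0, 1])

def Spec_bin_boundaries (data : List Int) (bin_indices : List Int) (out : List (Int × Int × Int)) : Prop := out = bin_boundaries_alt data bin_indices
instance (data : List Int) (bin_indices : List Int) (out : List (Int × Int × Int)) : Decidable (Spec_bin_boundaries data bin_indices out) := by unfold Spec_bin_boundaries; infer_instance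

-- ===== CLAIM (what is proved, stated in full; the proofs are below) =====
def Claim_equal_bin_boundaries : Prop := ∀ (data : List Int) (bin_indices : List Int), Dom_bin_boundaries data bin_indices → Pre_bin_boundaries data bin_indices → Spec_bin_boundaries data bin_indices (bin_boundaries data bin_indices)

-- ===== LEMMAS AND PROOFS =====

-- The list of values that land in bin k, in order (ps = zip of (value, bin)).
def pvGroup (ps : List (Int × Int)) (k : Int) : List Int :=
  (ps.filter (fun p => p.2 == k)).map (fun p => p.1)

-- (min, max) of a bin list, as both ports compute it.
def pvExt (g : List Int) : Int × Int :=
  ((PySem.List.min? g (fun x => x)).getD 0, (PySem.List.max? g (fun x => x)).getD 0)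

-- Common normal form of both outputs: bins in first-appearance order, each with its extrema.
def pvSpecOut (ps : List (Int × Int)) : List (Int × Int × Int) :=
  (PySem.List.dedup (ps.map (fun p => p.2))).map (fun k => (k, pvExt (pvGroup ps k)))

theorem pv_foldA_shift {σ : Type} (f : σ → Int → Int → σ) (xs : List Int) :
    ∀ (pre bs : List Int) (s : σ), xs.length ≤ bs.length →
    (PySem.List.enumerate xs (pre.length : Int)).foldl
        (fun d iv => f d iv.2 ((PySem.List.pyGet? (pre ++ bs) iv.1).getD 0)) s
      = (xs.zip bs).foldl (fun d vb => f d vb.1 vb.2) s := by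
  induction xs with
  | nil => intro pre bs s _; simp [PySem.List.enumerate]
  | cons x xs ih =>
    intro pre bs s h
    cases bs with
    | nil => simp at h
    | cons b bs =>
      have hget : PySem.List.pyGet? (pre ++ b :: bs) ((pre.length : Nat) : Int) = some b := by
        rw [PySem.List.pyGet?_natCast]
        simp
      have hrec := ih (pre ++ [b]) bs (f s x b) (by simpa using Nat.le_of_succ_le_succ h)
      simp only [List.length_append, List.length_cons, List.length_nil, Nat.cast_add,
        Nat.cast_one, List.append_assoc, List.cons_append, List.nil_append] at hrec
      simpa [PySem.List.enumerate_cons, hget] using hrec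

theorem pv_stepA_modify (d : PySem.Dict Int (List Int)) (v b : Int) :
    ((if d.contains b then d else d.insert b ([] : List Int)).modify b [] (fun l => l ++ [v]))
      = d.modify b [] (fun l => l ++ [v]) := by
  by_cases h : d.contains b = true
  · simp [h]
  · have h' : d.contains b = false := by simpa using h
    simp [h', PySem.Dict.modify, PySem.Dict.getD_insert_self, PySem.Dict.insert_insert_self,
      PySem.Dict.getD_of_not_contains d _ h']

theorem pv_group_append (ps : List (Int × Int)) (q : Int × Int) (k : Int) :
    pvGroup (ps ++ [q]) k = pvGroup ps k ++ (if q.2 == k then [q.1] else []) := by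
  by_cases h : q.2 == k <;> simp [pvGroup, List.filter_append, h]

theorem pv_group_ne_nil (ps : List (Int × Int)) (k : Int)
    (h : k ∈ ps.map (fun p => p.2)) : pvGroup ps k ≠ [] := by
  obtain ⟨p, hp, rfl⟩ := List.mem_map.mp h
  simp only [pvGroup, ne_eq, List.map_eq_nil_iff, List.filter_eq_nil_iff]
  intro hall
  have := hall p hp
  simp at this

theorem pv_group_nil_of_not_mem (ps : List (Int × Int)) (k : Int)
    (h : k ∉ ps.map (fun p => p.2)) : pvGroup ps k = [] := by
  simp only [pvGroup, List.map_eq_nil_iff, List.filter_eq_nil_iff]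
  intro p hp hbeq
  exact h (List.mem_map.mpr ⟨p, hp, by simpa using hbeq⟩)

theorem pv_minD_append (g : List Int) (v : Int) (hg : g ≠ []) :
    (PySem.List.min? (g ++ [v]) (fun x => x)).getD 0
      = min ((PySem.List.min? g (fun x => x)).getD 0) v := by
  obtain ⟨m, hm⟩ : ∃ m, PySem.List.min? g (fun x => x) = some m := by
    cases hcase : PySem.List.min? g (fun x => x) with
    | none => exact absurd ((PySem.List.min?_eq_none_iff g _).mp hcase) hg
    | some m => exact ⟨m, rfl⟩
  simp only [PySem.List.min?] at hm ⊢
  rw [List.foldl_append, hm]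
  simp only [List.foldl_cons, List.foldl_nil]
  by_cases hvm : v < m <;> simp [hvm, min_def]

theorem pv_maxD_append (g : List Int) (v : Int) (hg : g ≠ []) :
    (PySem.List.max? (g ++ [v]) (fun x => x)).getD 0
      = max ((PySem.List.max? g (fun x => x)).getD 0) v := by
  obtain ⟨m, hm⟩ : ∃ m, PySem.List.max? g (fun x => x) = some m := by
    cases hcase : PySem.List.max? g (fun x => x) with
    | none => exact absurd ((PySem.List.max?_eq_none_iff g _).mp hcase) hg
    | some m => exact ⟨m, rfl⟩
  simp only [PySem.List.max?] at hm ⊢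
  rw [List.foldl_append, hm]
  simp only [List.foldl_cons, List.foldl_nil]
  by_cases hvm : m < v <;> simp [hvm, max_def] <;> omega

theorem pv_ext_append (g : List Int) (v : Int) (hg : g ≠ []) :
    pvExt (g ++ [v]) = (min (pvExt g).1 v, max (pvExt g).2 v) := by
  simp [pvExt, pv_minD_append g v hg, pv_maxD_append g v hg]

theorem pv_ext_singleton (v : Int) : pvExt [v] = (v, v) := by
  simp [pvExt, PySem.List.min?, PySem.List.max?]

theorem pv_dedup_append_mem (xs : List Int) (x : Int) (h : x ∈ PySem.List.dedup xs) :
    PySem.List.dedup (xs ++ [x]) = PySem.List.dedup xs := by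
  simp only [PySem.List.dedup_eq_ofList] at *
  have h1 : PySem.Set.ofList (xs ++ [x]) = PySem.Set.add (PySem.Set.ofList xs) x := by
    simp [PySem.Set.ofList, List.foldl_append]
  rw [h1, PySem.Set.add]
  simp [h]

theorem pv_dedup_append_not_mem (xs : List Int) (x : Int) (h : x ∉ PySem.List.dedup xs) :
    PySem.List.dedup (xs ++ [x]) = PySem.List.dedup xs ++ [x] := by
  simp only [PySem.List.dedup_eq_ofList] at *
  have h1 : PySem.Set.ofList (xs ++ [x]) = PySem.Set.add (PySem.Set.ofList xs) x := by
    simp [PySem.Set.ofList, List.foldl_append]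
  rw [h1, PySem.Set.add]
  simp [h]

-- B's loop step: inserting one (value, bin) pair updates the normal form accordingly.
theorem pv_stepB (ps : List (Int × Int)) (q : Int × Int) (d : PySem.Dict Int (Int × Int))
    (hd : d.items = pvSpecOut ps) :
    (match d.get? q.2 with
     | some lh => d.insert q.2 (min lh.1 q.1, max lh.2 q.1)
     | none => d.insert q.2 (q.1, q.1)).items = pvSpecOut (ps ++ [q]) := by
  have hkeys : d.keys = PySem.List.dedup (ps.map (fun p => p.2)) := by
    show d.items.map (fun p => p.1) = _
    rw [hd]
    unfold pvSpecOut
    rw [List.map_map]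
    have hcomp : ((fun p : Int × (Int × Int) => p.1) ∘ fun k => (k, pvExt (pvGroup ps k))) = id := by
      funext k; rfl
    rw [hcomp, List.map_id]
  have hnodup : d.keys.Nodup := by rw [hkeys]; exact PySem.List.nodup_dedup _
  have hmapsnd : ((ps ++ [q]).map (fun p => p.2)) = ps.map (fun p => p.2) ++ [q.2] := by simp
  by_cases hmem : q.2 ∈ ps.map (fun p => p.2)
  · have hmemd : q.2 ∈ PySem.List.dedup (ps.map (fun p => p.2)) :=
      (PySem.List.mem_dedup _ _).mpr hmem
    have hitem : (q.2, pvExt (pvGroup ps q.2)) ∈ d.items := by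
      rw [hd]; exact List.mem_map.mpr ⟨q.2, hmemd, rfl⟩
    have hget : d.get? q.2 = some (pvExt (pvGroup ps q.2)) :=
      PySem.Dict.get?_of_mem_items d hitem hnodup
    have hcont : d.contains q.2 = true :=
      (PySem.Dict.contains_iff_mem_keys d q.2).mpr (by rw [hkeys]; exact hmemd)
    simp only [hget]
    rw [PySem.Dict.items_insert_of_contains d _ hcont, hd]
    unfold pvSpecOut
    rw [hmapsnd, pv_dedup_append_mem _ _ hmemd, List.map_map]
    apply List.map_congr_left
    intro k hk
    by_cases hkq : k = q.2
    · have hne := pv_group_ne_nil ps q.2 hmem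
      subst hkq
      simp [Function.comp, pv_group_append, pv_ext_append _ _ hne]
    · have hqk : ¬ q.2 = k := fun hqk => hkq hqk.symm
      simp [Function.comp, hkq, hqk, pv_group_append]
  · have hnot : q.2 ∉ PySem.List.dedup (ps.map (fun p => p.2)) := fun hc =>
      hmem ((PySem.List.mem_dedup _ _).mp hc)
    have hget : d.get? q.2 = none :=
      (PySem.Dict.get?_eq_none_iff_not_mem_keys d q.2).mpr (by rw [hkeys]; exact hnot)
    have hcont : d.contains q.2 = false := by
      cases hc : d.contains q.2 with
      | false => rfl
      | true =>
          exact absurd ((PySem.Dict.contains_iff_mem_keys d q.2).mp hc)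
            (by rw [hkeys]; exact hnot)
    simp only [hget]
    rw [PySem.Dict.items_insert_of_not_contains d _ hcont, hd]
    unfold pvSpecOut
    rw [hmapsnd, pv_dedup_append_not_mem _ _ hnot, List.map_append]
    congr 1
    · apply List.map_congr_left
      intro k hk
      have hkq : ¬ q.2 = k := fun h2 => hnot (h2 ▸ hk)
      simp [pv_group_append, hkq]
    · simp [pv_group_append, pv_group_nil_of_not_mem ps q.2 hmem, pv_ext_singleton]

-- B's loop invariant: after consuming ps, the dict's items are exactly pvSpecOut ps.
theorem pv_B_inv (ps : List (Int × Int)) :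
    (ps.foldl
        (fun bd vb =>
          match bd.get? vb.2 with
          | some lh => bd.insert vb.2 (min lh.1 vb.1, max lh.2 vb.1)
          | none => bd.insert vb.2 (vb.1, vb.1))
        (PySem.Dict.empty : PySem.Dict Int (Int × Int))).items
      = pvSpecOut ps := by
  induction ps using List.reverseRecOn with
  | nil => rfl
  | append_singleton ps q ih =>
    rw [List.foldl_append, List.foldl_cons, List.foldl_nil]
    exact pv_stepB ps q _ ih

-- A's grouping dict after the first loop, characterized.
theorem pv_A_items (ps : List (Int × Int)) :
    (ps.foldl (fun d vb => d.modify vb.2 [] (fun l => l ++ [vb.1]))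
        (PySem.Dict.empty : PySem.Dict Int (List Int))).items
      = (PySem.List.dedup (ps.map (fun p => p.2))).map (fun k => (k, pvGroup ps k)) := by
  have hkeys : (ps.foldl (fun d vb => d.modify vb.2 [] (fun l => l ++ [vb.1]))
      (PySem.Dict.empty : PySem.Dict Int (List Int))).keys
      = PySem.List.dedup (ps.map (fun p => p.2)) := by
    rw [PySem.Dict.keys_foldl_modify_key ps (fun vb => vb.2) []
      (fun _ vb => (fun l => l ++ [vb.1])) PySem.Dict.empty]
    simp [PySem.Dict.keys_empty, PySem.Set.update, PySem.Set.ofList, PySem.Set.empty,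
      PySem.List.dedup_eq_ofList]
  have hnodup : (ps.foldl (fun d vb => d.modify vb.2 [] (fun l => l ++ [vb.1]))
      (PySem.Dict.empty : PySem.Dict Int (List Int))).keys.Nodup := by
    rw [hkeys]; exact PySem.List.nodup_dedup _
  have hget : ∀ c, (ps.foldl (fun d vb => d.modify vb.2 [] (fun l => l ++ [vb.1]))
      (PySem.Dict.empty : PySem.Dict Int (List Int))).getD c [] = pvGroup ps c := by
    intro c
    have hswap : (ps.foldl (fun d vb => d.modify vb.2 [] (fun l => l ++ [vb.1]))
        (PySem.Dict.empty : PySem.Dict Int (List Int)))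
        = (ps.map Prod.swap).foldl (fun d p => d.modify p.1 [] (fun l => l ++ [p.2]))
            PySem.Dict.empty := by
      rw [List.foldl_map]
      rfl
    rw [hswap, PySem.Dict.getD_foldl_modify_append]
    simp [pvGroup, List.filter_map, List.map_map, Function.comp_def,
      PySem.Dict.getD_empty]
  rw [PySem.Dict.items_eq_map_keys _ hnodup [], hkeys]
  apply List.map_congr_left
  intro k hk
  rw [hget k]

-- A's result equals the common normal form (inside Pre_).
theorem pv_A_eq (data bin_indices : List Int) (h : data.length ≤ bin_indices.length) :
    bin_boundaries data bin_indices = pvSpecOut (data.zip bin_indices) := by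
  have hs := pv_foldA_shift
    (fun d v b => (if d.contains b then d else d.insert b ([] : List Int)).modify b []
      (fun l => l ++ [v]))
    data [] bin_indices PySem.Dict.empty h
  simp only [List.nil_append, List.length_nil, Nat.cast_zero, pv_stepA_modify] at hs
  have hie : (PySem.Dict.empty : PySem.Dict Int (Int × Int)).items = [] := rfl
  have hnodup' : ((((PySem.List.dedup ((data.zip bin_indices).map (fun p => p.2))).map
      (fun k => (k, pvGroup (data.zip bin_indices) k))).map (fun p => p.1))).Nodup := by
    rw [List.map_map]
    have hcomp : ((fun p : Int × List Int => p.1) ∘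
        fun k => (k, pvGroup (data.zip bin_indices) k)) = id := by
      funext k; rfl
    rw [hcomp, List.map_id]
    exact PySem.List.nodup_dedup _
  unfold bin_boundaries
  simp only [pv_stepA_modify]
  rw [hs, pv_A_items]
  have hfresh := PySem.Dict.items_foldl_insert_fresh
    ((PySem.List.dedup ((data.zip bin_indices).map (fun p => p.2))).map
      (fun k => (k, pvGroup (data.zip bin_indices) k)))
    (fun p => p.1)
    (fun p => ((PySem.List.min? p.2 (fun x => x)).getD 0,
               (PySem.List.max? p.2 (fun x => x)).getD 0))
    PySem.Dict.empty (fun a _ => PySem.Dict.contains_empty a.1) hnodup'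
  beta_reduce at hfresh
  rw [hfresh, hie, List.nil_append, List.map_map]
  simp [pvSpecOut, pvExt, Function.comp_def]

-- ===== VERDICT (by name: the statement is the Claim_ definition above) =====
theorem bin_boundaries_spec : Claim_equal_bin_boundaries := by
  intro data bin_indices _ hpre
  unfold Spec_bin_boundaries bin_boundaries_alt
  rw [pv_A_eq data bin_indices hpre, pv_B_inv]
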